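-- pv_equiv track=rewrite | github.com/jayp06/project-in-python | projeto.py | atribuir_medalha
-- ===== SOURCE A (Python) =====
-- def atribuir_medalha(distancia_total):
--     medalhas = [
--         (500, "Medalha: Esmeralda (500 km atingidos!)"),
--         (325, "Medalha: Diamante (325 km atingidos!)"),
--         (250, "Medalha: Platina (250 km atingidos!)"),
--         (150, "Medalha: Ouro (150 km atingidos!)"),
--         (100, "Medalha: Bronze (100 km atingidos!)"),
--         (50, "Medalha: Ferro (50 km atingidos!)"),
--         (25, "Medalha: Madeira (25 km atingidos!)"),
--     ]
--
--     for meta, medalha in medalhas: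
--         if distancia_total >= meta:
--             return medalha
--     return None
-- ===== SOURCE B (Python) =====
-- import bisect
--
-- _THRESHOLDS = [25, 50, 100, 150, 250, 325, 500]
-- _LABELS = [
--     "Medalha: Madeira (25 km atingidos!)",
--     "Medalha: Ferro (50 km atingidos!)",
--     "Medalha: Bronze (100 km atingidos!)",
--     "Medalha: Ouro (150 km atingidos!)",
--     "Medalha: Platina (250 km atingidos!)",
--     "Medalha: Diamante (325 km atingidos!)",
--     "Medalha: Esmeralda (500 km atingidos!)",
-- ]
--
--
-- def atribuir_medalha(distancia_total):
--     i = bisect.bisect_right(_THRESHOLDS, distancia_total)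
--     if i == 0:
--         return None
--     return _LABELS[i - 1]
-- ===== Notes on version B (the rewrite author's own statement) =====
-- stated objective: idiomatic
-- what changed: Replaces the descending first-match linear scan with an ascending sorted threshold table queried by bisect_right, indexing a parallel label table.
import Mathlib
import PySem

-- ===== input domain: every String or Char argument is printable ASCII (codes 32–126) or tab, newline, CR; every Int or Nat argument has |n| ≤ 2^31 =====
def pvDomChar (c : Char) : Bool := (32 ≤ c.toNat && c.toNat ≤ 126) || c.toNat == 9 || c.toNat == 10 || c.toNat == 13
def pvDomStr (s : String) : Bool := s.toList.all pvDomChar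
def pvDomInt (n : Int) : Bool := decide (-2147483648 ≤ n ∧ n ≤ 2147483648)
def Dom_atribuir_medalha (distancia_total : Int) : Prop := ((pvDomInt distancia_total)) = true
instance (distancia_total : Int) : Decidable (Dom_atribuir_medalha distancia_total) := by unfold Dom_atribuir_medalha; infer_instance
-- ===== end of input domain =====

-- B replaces A's descending linear scan with bisect_right over an ascending
-- threshold table plus a parallel label table (idiomatic table lookup).

-- ===== PORT A =====
-- the for-loop over the descending (meta, medalha) list: first pair with d ≥ meta wins
def pvLoopA (d : Int) : List (Int × String) → Option String
  | [] => none
  | (m, medalha) :: rest => if d ≥ m then some medalha else pvLoopA d rest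

def atribuir_medalha (distancia_total : Int) : Option String :=
  pvLoopA distancia_total
    [ (500, "Medalha: Esmeralda (500 km atingidos!)"),
      (325, "Medalha: Diamante (325 km atingidos!)"),
      (250, "Medalha: Platina (250 km atingidos!)"),
      (150, "Medalha: Ouro (150 km atingidos!)"),
      (100, "Medalha: Bronze (100 km atingidos!)"),
      (50, "Medalha: Ferro (50 km atingidos!)"),
      (25, "Medalha: Madeira (25 km atingidos!)") ]

-- ===== PORT B =====
def pvThresholds : List Int := [25, 50, 100, 150, 250, 325, 500]

def pvLabels : List String :=
  [ "Medalha: Madeira (25 km atingidos!)",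
    "Medalha: Ferro (50 km atingidos!)",
    "Medalha: Bronze (100 km atingidos!)",
    "Medalha: Ouro (150 km atingidos!)",
    "Medalha: Platina (250 km atingidos!)",
    "Medalha: Diamante (325 km atingidos!)",
    "Medalha: Esmeralda (500 km atingidos!)" ]

-- stdlib bisect.bisect_right, ported as the standard binary search on [lo, hi)
def pvBisectRight (a : List Int) (x : Int) (lo hi : Nat) : Nat :=
  if h : lo < hi then
    let mid := (lo + hi) / 2
    if x < a.getD mid 0 then pvBisectRight a x lo mid
    else pvBisectRight a x (mid + 1) hi
  else lo
termination_by hi - lo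
decreasing_by all_goals omega

def atribuir_medalha_alt (distancia_total : Int) : Option String :=
  let i := pvBisectRight pvThresholds distancia_total 0 pvThresholds.length
  if i = 0 then none
  -- index i-1 is always in range (1 ≤ i ≤ 7); getD's default is unreachable
  else some (pvLabels.getD (i - 1) "")

-- ===== PRECONDITION & SPEC =====
def Spec_atribuir_medalha (distancia_total : Int) (out : Option String) : Prop := out = atribuir_medalha_alt distancia_total
instance (distancia_total : Int) (out : Option String) : Decidable (Spec_atribuir_medalha distancia_total out) := by unfold Spec_atribuir_medalha; infer_instance

-- ===== CLAIM (what is proved, stated in full; the proofs are below) =====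
def Claim_equal_atribuir_medalha : Prop := ∀ (distancia_total : Int), Dom_atribuir_medalha distancia_total → Spec_atribuir_medalha distancia_total (atribuir_medalha distancia_total)

-- ===== LEMMAS AND PROOFS =====

-- ===== VERDICT (by name: the statement is the Claim_ definition above) =====
theorem atribuir_medalha_spec : Claim_equal_atribuir_medalha := by
  intro d _
  unfold Spec_atribuir_medalha atribuir_medalha atribuir_medalha_alt
  simp [pvLoopA, pvThresholds, pvLabels, pvBisectRight, List.getD]
  split_ifs <;> first | rfl | omega
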